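-- pv_equiv track=rewrite | github.com/stho32/VoicedTrainer | voiced_trainer/trainer.py | _handle_follow_up_questions
-- ===== SOURCE A (Python) =====
-- from typing import List, Dict, Any, Optional
--
-- def _handle_follow_up_questions(follow_up_text: str) -> List[str]:
--     """
--     Parse follow-up questions from text and handle them one by one.
--
--     Args:
--         follow_up_text: Text containing follow-up questions
--
--     Returns:
--         List of question/answer pairs
--     """
--     # Versuche, einzelne Fragen aus dem Text zu extrahieren
--     questions = []
--     lines = follow_up_text.split('\n')
--
--     current_question = ""
--     for line in lines:
--         line = line.strip()
--         # Versuche, nummerierte Fragen oder mit Sternen markierte Fragen zu finden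
--         if (line and (line[0].isdigit() and ". " in line[:5]) or
--             line.startswith("- ") or line.startswith("* ")):
--             if current_question:
--                 questions.append(current_question)
--             current_question = line
--         elif current_question and line:
--             current_question += " " + line
--
--     if current_question:
--         questions.append(current_question)
--
--     # Wenn keine Fragen gefunden wurden, aber Text vorhanden ist, behandle den ganzen Text als eine Frage
--     if not questions and follow_up_text.strip():
--         questions = [follow_up_text.strip()]
--
--     # Begrenze auf maximal 3 Fragen
--     return questions[:3]
-- ===== SOURCE B (Python) =====
-- from typing import List
--
-- def _handle_follow_up_questions(follow_up_text: str) -> List[str]: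
--     """Span-based re-implementation: strip all lines once, then group each
--     start line with the following non-empty lines up to the next start line."""
--     def _is_start(line: str) -> bool:
--         return bool((line and line[0].isdigit() and ". " in line[:5])
--                     or line.startswith("- ") or line.startswith("* "))
--
--     stripped = [ln.strip() for ln in follow_up_text.split("\n")]
--     n = len(stripped)
--     questions = []
--     i = 0
--     while i < n and not _is_start(stripped[i]):
--         i += 1
--     while i < n:
--         j = i + 1
--         while j < n and not _is_start(stripped[j]):
--             j += 1
--         questions.append(" ".join([stripped[i]] + [s for s in stripped[i + 1:j] if s]))
--         i = j
--     if not questions and follow_up_text.strip():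
--         questions = [follow_up_text.strip()]
--     return questions[:3]
-- ===== Notes on version B (the rewrite author's own statement) =====
-- stated objective: alternative
-- what changed: A's single scan with a mutable current_question accumulator is replaced by a two-phase decomposition: strip all lines once, then group each start line with the following non-empty stripped lines up to the next start line (span grouping) and join each group with single spaces.
import Mathlib
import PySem

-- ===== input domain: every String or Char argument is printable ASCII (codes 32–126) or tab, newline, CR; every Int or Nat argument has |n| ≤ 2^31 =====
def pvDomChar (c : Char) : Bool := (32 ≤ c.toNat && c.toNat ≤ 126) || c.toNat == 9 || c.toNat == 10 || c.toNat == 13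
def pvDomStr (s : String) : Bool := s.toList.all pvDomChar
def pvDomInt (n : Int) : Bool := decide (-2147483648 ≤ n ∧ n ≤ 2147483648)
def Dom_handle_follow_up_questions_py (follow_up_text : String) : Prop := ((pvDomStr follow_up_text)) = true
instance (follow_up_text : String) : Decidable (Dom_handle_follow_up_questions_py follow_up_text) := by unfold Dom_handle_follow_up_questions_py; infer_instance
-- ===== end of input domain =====

-- B re-implements A's single accumulator scan as a two-phase span grouping (strip once,
-- then join each start line with the non-empty lines up to the next start line); same
-- return value, objective: alternative decomposition.

-- ===== PORT A =====
-- the guard of A's if, truthiness made boolean: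
-- (line and line[0].isdigit() and ". " in line[:5]) or line.startswith("- ") or line.startswith("* ")
def pvIsStart (line : String) : Bool :=
  (decide (line ≠ "") &&
    (match PySem.Str.pyGet? line 0 with
     | some c => PySem.Chars.isdigit c
     | none => false) &&
    PySem.Str.isIn ". " (PySem.Str.slice line none (some 5)))
  || PySem.Str.startswith line "- " || PySem.Str.startswith line "* "

-- one iteration of A's for-loop body, on the already-stripped line; state = (questions, current_question)
def pvStepA (st : List String × String) (line : String) : List String × String :=
  if pvIsStart line then
    ((if st.2 ≠ "" then st.1 ++ [st.2] else st.1), line)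
  else if st.2 ≠ "" ∧ line ≠ "" then
    (st.1, st.2 ++ " " ++ line)
  else st

-- 'if current_question: questions.append(current_question)' after the loop
def pvFinishA (st : List String × String) : List String :=
  if st.2 ≠ "" then st.1 ++ [st.2] else st.1

def handle_follow_up_questions_py (follow_up_text : String) : List String :=
  let lines := (PySem.Str.split? follow_up_text "\n").getD []   -- split('\n'); sep ≠ "" so never none
  let st := lines.foldl (fun st line0 => pvStepA st (PySem.Str.strip line0)) ([], "")
  let questions := pvFinishA st
  let questions :=
    if questions = [] ∧ PySem.Str.strip follow_up_text ≠ "" then [PySem.Str.strip follow_up_text]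
    else questions
  questions.take 3   -- questions[:3]

-- ===== PORT B =====
-- group the stripped lines: skip to the next start line, join it with the following
-- non-empty lines up to the next start line (span), recurse on the rest
def pvCollectB : List String → List String
  | [] => []
  | l :: rest =>
    if pvIsStart l then
      PySem.Str.join " " (l :: (rest.takeWhile (fun x => !pvIsStart x)).filter (fun s => decide (s ≠ "")))
        :: pvCollectB (rest.dropWhile (fun x => !pvIsStart x))
    else pvCollectB rest
  termination_by xs => xs.length
  decreasing_by
    · have := List.length_dropWhile_le (fun x => !pvIsStart x) rest
      simp; omega
    · simp

def handle_follow_up_questions_py_alt (follow_up_text : String) : List String :=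
  let stripped := ((PySem.Str.split? follow_up_text "\n").getD []).map PySem.Str.strip
  let questions := pvCollectB stripped
  (if questions = [] ∧ PySem.Str.strip follow_up_text ≠ "" then [PySem.Str.strip follow_up_text]
   else questions).take 3

-- ===== PRECONDITION & SPEC =====
def Spec_handle_follow_up_questions_py (follow_up_text : String) (out : List String) : Prop := out = handle_follow_up_questions_py_alt follow_up_text
instance (follow_up_text : String) (out : List String) : Decidable (Spec_handle_follow_up_questions_py follow_up_text out) := by unfold Spec_handle_follow_up_questions_py; infer_instance

-- ===== CLAIM (what is proved, stated in full; the proofs are below) =====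
def Claim_equal_handle_follow_up_questions_py : Prop := ∀ (follow_up_text : String), Dom_handle_follow_up_questions_py follow_up_text → Spec_handle_follow_up_questions_py follow_up_text (handle_follow_up_questions_py follow_up_text)

-- ===== LEMMAS AND PROOFS =====

-- A's incremental 'current_question += " " + line' over a run of continuation lines
def pvExtend (cur : String) (ys : List String) : String :=
  ys.foldl (fun c l => if l ≠ "" then c ++ " " ++ l else c) cur

theorem pvIsStart_ne_empty {l : String} (h : pvIsStart l = true) : l ≠ "" := by
  intro he; subst he; exact absurd h (by decide)

theorem pvAppend_ne_empty (a b : String) : a ++ " " ++ b ≠ "" := by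
  intro h
  have := congrArg String.toList h
  simp [String.toList_append] at this

theorem pvJoin_glue (a b : String) (M : List String) :
    PySem.Str.join " " ((a ++ " " ++ b) :: M) = PySem.Str.join " " (a :: b :: M) := by
  apply String.toList_inj.mp
  cases M with
  | nil =>
    simp [PySem.Str.toList_join, PySem.Chars.join_singleton, PySem.Chars.join_cons_cons,
      String.toList_append, List.append_assoc]
  | cons z zs =>
    simp [PySem.Str.toList_join, PySem.Chars.join_cons_cons, String.toList_append,
      List.append_assoc]

theorem pvJoin_single (cur : String) : PySem.Str.join " " [cur] = cur := by
  apply String.toList_inj.mp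
  simp [PySem.Str.toList_join, PySem.Chars.join_singleton]

theorem pvExtend_eq_join (ys : List String) (cur : String) :
    pvExtend cur ys = PySem.Str.join " " (cur :: ys.filter (fun s => decide (s ≠ ""))) := by
  induction ys generalizing cur with
  | nil => simp [pvExtend, pvJoin_single]
  | cons l rest ih =>
    by_cases hl : l = ""
    · subst hl
      simpa [pvExtend] using ih cur
    · have h2 := ih (cur ++ " " ++ l)
      simp only [pvExtend, List.foldl_cons, ne_eq, hl, not_false_eq_true,
        decide_true, List.filter_cons_of_pos] at h2 ⊢
      rw [if_pos trivial, h2]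
      exact pvJoin_glue _ _ _

theorem pvFoldA_of_ne (xs : List String) (qs : List String) (cur : String) (hc : cur ≠ "") :
    pvFinishA (xs.foldl pvStepA (qs, cur)) =
      qs ++ (pvExtend cur (xs.takeWhile (fun x => !pvIsStart x))
             :: pvCollectB (xs.dropWhile (fun x => !pvIsStart x))) := by
  induction xs generalizing qs cur with
  | nil => simp [pvFinishA, hc, pvExtend, pvCollectB]
  | cons l rest ih =>
    rw [List.foldl_cons]
    by_cases hs : pvIsStart l
    · have hl := pvIsStart_ne_empty hs
      have hstep : pvStepA (qs, cur) l = (qs ++ [cur], l) := by simp [pvStepA, hs, hc]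
      rw [hstep, ih _ _ hl]
      simp [pvCollectB, hs, pvExtend_eq_join, pvJoin_single]
    · by_cases hl : l = ""
      · subst hl
        have hstep : pvStepA (qs, cur) "" = (qs, cur) := by simp [pvStepA, hs]
        rw [hstep, ih _ _ hc]
        simp [hs, pvExtend_eq_join]
      · have hstep : pvStepA (qs, cur) l = (qs, cur ++ " " ++ l) := by
          simp [pvStepA, hs, hc, hl]
        rw [hstep, ih _ _ (pvAppend_ne_empty cur l)]
        simp only [List.takeWhile_cons, List.dropWhile_cons, hs, Bool.not_false, if_pos]
        rw [pvExtend_eq_join, pvExtend_eq_join]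
        simp only [ne_eq, hl, not_false_eq_true, decide_true, List.filter_cons_of_pos]
        rw [pvJoin_glue]

theorem pvFoldA_empty (xs : List String) (qs : List String) :
    pvFinishA (xs.foldl pvStepA (qs, "")) = qs ++ pvCollectB xs := by
  induction xs generalizing qs with
  | nil => simp [pvFinishA, pvCollectB]
  | cons l rest ih =>
    rw [List.foldl_cons]
    by_cases hs : pvIsStart l
    · have hstep : pvStepA (qs, "") l = (qs, l) := by simp [pvStepA, hs]
      rw [hstep, pvFoldA_of_ne _ _ _ (pvIsStart_ne_empty hs)]
      simp [pvCollectB, hs, pvExtend_eq_join]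
    · have hstep : pvStepA (qs, "") l = (qs, "") := by simp [pvStepA, hs]
      rw [hstep, ih]
      simp [pvCollectB, hs]

-- ===== VERDICT (by name: the statement is the Claim_ definition above) =====
theorem handle_follow_up_questions_py_spec : Claim_equal_handle_follow_up_questions_py := by
  intro t _
  unfold Spec_handle_follow_up_questions_py
  simp only [handle_follow_up_questions_py, handle_follow_up_questions_py_alt]
  rw [← List.foldl_map (f := PySem.Str.strip) (g := pvStepA), pvFoldA_empty]
  simp
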